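-- pv_equiv track=rewrite | github.com/quan-van3004/trituenhantao | ga_scheduler.py | create_individual
-- ===== SOURCE A (Python) =====
-- def create_individual(data):
--     schedule = []
--     time_slot = 7
--     for i, (subject, teacher, _class) in enumerate(data):
--         if time_slot >= 17:
--             time_slot = 7
--         time = f"Tiết {i+1}: {time_slot}h-{time_slot+1}h"
--         schedule.append([time, _class, subject, teacher])
--         time_slot += 1
--     return schedule
-- ===== SOURCE B (Python) =====
-- def create_individual(data):
--     def build(rows, start):
--         if not rows:
--             return []
--         head = [[f"Tiết {start + j}: {7 + j}h-{8 + j}h", c, s, t]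
--                 for j, (s, t, c) in enumerate(rows[:10])]
--         return head + build(rows[10:], start + 10)
--     return build(data, 1)
-- ===== Notes on version B (the rewrite author's own statement) =====
-- stated objective: alternative
-- what changed: Replaces the single loop with a carried, resetting time_slot counter by recursion on 10-row chunks: each chunk is rendered with fixed local slots 7..16 (slice + enumerate within the chunk), then the rest is handled recursively; no loop-carried state and no modulo.
import Mathlib
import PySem

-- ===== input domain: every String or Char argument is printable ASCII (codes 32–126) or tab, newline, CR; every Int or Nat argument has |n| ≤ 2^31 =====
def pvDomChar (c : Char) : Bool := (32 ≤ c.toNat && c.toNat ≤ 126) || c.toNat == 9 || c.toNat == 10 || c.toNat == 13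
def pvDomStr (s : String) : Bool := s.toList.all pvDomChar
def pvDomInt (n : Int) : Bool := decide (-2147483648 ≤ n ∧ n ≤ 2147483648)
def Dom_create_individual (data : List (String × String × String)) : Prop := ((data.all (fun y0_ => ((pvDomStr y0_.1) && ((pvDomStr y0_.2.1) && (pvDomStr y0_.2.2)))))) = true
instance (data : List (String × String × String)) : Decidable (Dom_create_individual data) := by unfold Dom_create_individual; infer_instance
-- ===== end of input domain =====

-- B replaces A's loop-carried resetting time_slot counter by recursion on 10-row chunks
-- with fixed local slots 7..16 per chunk (alternative decomposition, same cost).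

-- ===== PORT A =====
def create_individual (data : List (String × String × String)) : List (List String) :=
  ((PySem.List.enumerate data 0).foldl
    (fun (acc : List (List String) × Int) p =>
      let i := p.1
      let subject := p.2.1
      let teacher := p.2.2.1
      let _class := p.2.2.2
      let time_slot := if acc.2 ≥ 17 then 7 else acc.2
      let time := "Tiết " ++ PySem.Int.toStr (i + 1) ++ ": " ++ PySem.Int.toStr time_slot
                  ++ "h-" ++ PySem.Int.toStr (time_slot + 1) ++ "h"
      (acc.1 ++ [[time, _class, subject, teacher]], time_slot + 1))
    ([], 7)).1

-- ===== PORT B =====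
-- helper 'build' of Source B: recursion on 10-row chunks; rows[:10] / rows[10:] via PySem slices
def ci_build (rows : List (String × String × String)) (start : Int) : List (List String) :=
  if _h : rows = [] then []
  else
    ((PySem.List.enumerate (PySem.List.slice rows none (some 10)) 0).map
      (fun p =>
        ["Tiết " ++ PySem.Int.toStr (start + p.1) ++ ": " ++ PySem.Int.toStr (7 + p.1)
           ++ "h-" ++ PySem.Int.toStr (8 + p.1) ++ "h",
         p.2.2.2, p.2.1, p.2.2.1]))
    ++ ci_build (PySem.List.slice rows (some 10) none) (start + 10)
termination_by rows.length
decreasing_by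
  simp only [PySem.List.slice_from rows (by omega : (0:Int) ≤ 10), List.length_drop]
  have : rows.length ≠ 0 := by simp [_h]
  omega

def create_individual_alt (data : List (String × String × String)) : List (List String) :=
  ci_build data 1

-- ===== PRECONDITION & SPEC =====
def Spec_create_individual (data : List (String × String × String)) (out : List (List String)) : Prop := out = create_individual_alt data
instance (data : List (String × String × String)) (out : List (List String)) : Decidable (Spec_create_individual data out) := by unfold Spec_create_individual; infer_instance

-- ===== CLAIM (what is proved, stated in full; the proofs are below) =====
def Claim_equal_create_individual : Prop := ∀ (data : List (String × String × String)), Dom_create_individual data → Spec_create_individual data (create_individual data)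

-- ===== LEMMAS AND PROOFS =====

-- the common closed form both ports are compared against
def ci_row (p : Int × (String × String × String)) : List String :=
  let slot := 7 + PySem.Int.mod p.1 10
  ["Tiết " ++ PySem.Int.toStr (p.1 + 1) ++ ": " ++ PySem.Int.toStr slot
     ++ "h-" ++ PySem.Int.toStr (slot + 1) ++ "h",
   p.2.2.2, p.2.1, p.2.2.1]

lemma ci_loop (data : List (String × String × String)) :
    ∀ (i t : Int) (acc : List (List String)), 0 ≤ i → t ≤ 17 →
      (if t ≥ 17 then (7:Int) else t) = 7 + PySem.Int.mod i 10 →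
      ((PySem.List.enumerate data i).foldl
        (fun (acc : List (List String) × Int) p =>
          let time_slot := if acc.2 ≥ 17 then 7 else acc.2
          (acc.1 ++ [["Tiết " ++ PySem.Int.toStr (p.1 + 1) ++ ": " ++ PySem.Int.toStr time_slot
                  ++ "h-" ++ PySem.Int.toStr (time_slot + 1) ++ "h", p.2.2.2, p.2.1, p.2.2.1]],
            time_slot + 1))
        (acc, t)).1
      = acc ++ (PySem.List.enumerate data i).map ci_row := by
  induction data with
  | nil => intro i t acc _ _ _; simp [PySem.List.enumerate_nil]
  | cons x xs ih =>
    intro i t acc hi ht hinv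
    have hm := PySem.Int.mod_eq_emod_of_pos (a := i) (b := 10) (by omega)
    have hm' := PySem.Int.mod_eq_emod_of_pos (a := i + 1) (b := 10) (by omega)
    rw [PySem.List.enumerate_cons]
    simp only [List.foldl_cons, List.map_cons]
    rw [hinv, ih (i + 1) (7 + PySem.Int.mod i 10 + 1) _ (by omega)
      (by rw [hm]; omega)
      (by rw [hm, hm']; split <;> omega)]
    simp [ci_row]

-- within a chunk: enumeration from a multiple of 10 versus local enumeration from 0
lemma ci_chunk (xs : List (String × String × String)) :
    ∀ (j k : Nat), xs.length + j ≤ 10 →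
      (PySem.List.enumerate xs ((10 * k + j : Nat) : Int)).map ci_row
      = (PySem.List.enumerate xs ((j : Nat) : Int)).map
          (fun p =>
            ["Tiết " ++ PySem.Int.toStr (((10 * k + 1 : Nat) : Int) + p.1) ++ ": "
               ++ PySem.Int.toStr (7 + p.1) ++ "h-" ++ PySem.Int.toStr (8 + p.1) ++ "h",
             p.2.2.2, p.2.1, p.2.2.1]) := by
  induction xs with
  | nil => intro j k _; simp [PySem.List.enumerate_nil]
  | cons x xs ih =>
    intro j k hlen
    have hj : j < 10 := by simp only [List.length_cons] at hlen; omega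
    rw [PySem.List.enumerate_cons, PySem.List.enumerate_cons, List.map_cons, List.map_cons]
    have hmod : PySem.Int.mod ((10 * k + j : Nat) : Int) 10 = (j : Int) := by
      rw [PySem.Int.mod_eq_emod_of_pos (by omega)]
      push_cast
      omega
    have h1 : ((10 * k + j : Nat) : Int) + 1 = ((10 * k + 1 : Nat) : Int) + ((j : Nat) : Int) := by
      push_cast; ring
    have h2 : (7 : Int) + ((j : Nat) : Int) + 1 = 8 + ((j : Nat) : Int) := by ring
    have hcast : ((10 * k + j : Nat) : Int) + 1 = ((10 * k + (j + 1) : Nat) : Int) := by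
      push_cast; ring
    have hcast2 : ((j : Nat) : Int) + 1 = (((j + 1 : Nat)) : Int) := by push_cast; ring
    rw [hcast, hcast2, ih (j + 1) k (by simp only [List.length_cons] at hlen; omega)]
    simp only [ci_row, hmod, h1, h2]

lemma ci_build_eq (n : Nat) :
    ∀ (rows : List (String × String × String)), rows.length ≤ n → ∀ (k : Nat),
      ci_build rows ((10 * k + 1 : Nat) : Int)
      = (PySem.List.enumerate rows ((10 * k : Nat) : Int)).map ci_row := by
  induction n with
  | zero =>
    intro rows hlen k
    have hnil : rows = [] := by cases rows <;> simp_all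
    subst hnil
    unfold ci_build
    simp [PySem.List.enumerate_nil]
  | succ n ih =>
    intro rows hlen k
    by_cases hnil : rows = []
    · subst hnil; unfold ci_build; simp [PySem.List.enumerate_nil]
    · conv_lhs => unfold ci_build
      simp only [hnil, dite_false]
      rw [PySem.List.slice_to rows (by omega : (0:Int) ≤ 10),
          PySem.List.slice_from rows (by omega : (0:Int) ≤ 10)]
      have h10 : ((10:Int)).toNat = 10 := rfl
      rw [h10]
      have hsplit : rows = rows.take 10 ++ rows.drop 10 := (List.take_append_drop _ _).symm
      conv_rhs => rw [hsplit]
      rw [PySem.List.enumerate_append, List.map_append]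
      congr 1
      · have hch := ci_chunk (rows.take 10) 0 k
          (by simp only [List.length_take]; omega)
        simp only [Nat.add_zero, Nat.cast_zero] at hch
        rw [hch]
      · by_cases hlen10 : rows.length ≤ 10
        · have hd : rows.drop 10 = [] := List.drop_eq_nil_of_le hlen10
          rw [hd]
          unfold ci_build
          simp [PySem.List.enumerate_nil]
        · have htk : ((rows.take 10).length : Int) = 10 := by
            simp only [List.length_take]; push_cast; omega
          have hstart : ((10 * k + 1 : Nat) : Int) + 10 = ((10 * (k + 1) + 1 : Nat) : Int) := by
            push_cast; ring
          have hstart2 : ((10 * k : Nat) : Int) + ((rows.take 10).length : Int)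
              = ((10 * (k + 1) : Nat) : Int) := by rw [htk]; push_cast; ring
          have hdlen : (rows.drop 10).length ≤ n := by
            simp only [List.length_drop]; omega
          rw [hstart, hstart2, ih _ hdlen (k + 1)]

-- ===== VERDICT (by name: the statement is the Claim_ definition above) =====
theorem create_individual_spec : Claim_equal_create_individual := by
  intro data _
  unfold Spec_create_individual create_individual create_individual_alt
  have hA := ci_loop data 0 7 [] (by omega) (by omega) (by decide)
  have hB := ci_build_eq data.length data (le_refl _) 0
  norm_num at hB
  simpa [hB] using hA
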